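-- pv_equiv track=rewrite | github.com/mikemccand/luceneutil | src/python/knnPerfTest.py | remove_common_args
-- ===== SOURCE A (Python) =====
-- def remove_common_args(argmaps):
--   common_args = argmaps[0].copy()
--   for args in argmaps[1:]:
--     for k in list(common_args.keys()):
--       if k not in args or args[k] != common_args[k]:
--         del common_args[k]
--   # don't use fanout as a dimension in a data series label
--   # TODO: also remove other "minor" dimensions such as beam_width and maxconn?
--   # or place under user control somehow
--   common_args["-fanout"] = 1
--   # everything remaining is in common to all rows, now remove them
--   unique_args = []
--   for args in argmaps:
--     ua = dict()
--     for k, v in args.items():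
--       if k not in common_args:
--         ua[k] = v
--     unique_args.append(ua)
--   return unique_args
-- ===== SOURCE B (Python) =====
-- def remove_common_args(argmaps):
--   n = len(argmaps)
--   # one pass: stats[k] = (representative value, count, values-consistent flag)
--   stats = {}
--   for args in argmaps:
--     for k, v in args.items():
--       if k in stats:
--         rep, cnt, ok = stats[k]
--         stats[k] = (rep, cnt + 1, ok and rep == v)
--       else:
--         stats[k] = (v, 1, True)
--   common = {k for k, (rep, cnt, ok) in stats.items() if cnt == n and ok}
--   # never use fanout as a dimension in a data series label
--   common.add("-fanout")
--   return [{k: v for k, v in args.items() if k not in common} for args in argmaps]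
-- ===== Notes on version B (the rewrite author's own statement) =====
-- stated objective: alternative
-- what changed: Replaces A's delete-from-a-copy-of-the-first-dict loop (re-scanning the shrinking common-key dict for every row) by a single pass that tallies per key a representative value, a count and a consistency flag, then takes as common the keys seen in every row with a consistent value.
-- crash fix: On empty argmaps A raises IndexError (argmaps[0]); B naturally returns []. — e.g. on remove_common_args([]): A raises IndexError, B returns []
import Mathlib
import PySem

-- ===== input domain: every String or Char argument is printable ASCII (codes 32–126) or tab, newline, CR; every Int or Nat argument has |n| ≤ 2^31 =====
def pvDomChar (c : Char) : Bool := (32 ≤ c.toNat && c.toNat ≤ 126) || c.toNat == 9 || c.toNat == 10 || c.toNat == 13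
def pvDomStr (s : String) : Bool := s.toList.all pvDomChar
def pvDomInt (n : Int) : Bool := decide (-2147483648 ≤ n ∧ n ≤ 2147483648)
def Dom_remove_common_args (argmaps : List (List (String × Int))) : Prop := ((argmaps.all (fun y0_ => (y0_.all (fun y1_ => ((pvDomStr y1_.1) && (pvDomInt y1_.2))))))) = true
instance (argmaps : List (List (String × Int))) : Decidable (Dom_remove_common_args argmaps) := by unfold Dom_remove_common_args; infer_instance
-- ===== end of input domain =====

-- B replaces A's delete-from-a-copy-of-the-first-dict loop by a single tally pass
-- (per key: representative value, count, consistency flag); an alternative of similar cost.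

-- ===== PORT A =====
-- inner loop: 'for k in list(common_args.keys()): if k not in args or args[k] != common_args[k]: del common_args[k]'
def pvAInner (ad : PySem.Dict String Int) (c : PySem.Dict String Int) : PySem.Dict String Int :=
  c.keys.foldl (fun c k =>
    if !(ad.contains k) || (ad.getD k 0 != c.getD k 0) then c.erase k else c) c

def remove_common_args (argmaps : List (List (String × Int))) : List (List (String × Int)) :=
  match argmaps with
  | [] => []   -- Python raises IndexError on argmaps[0]; excluded by Pre_
  | d0 :: rest =>
    let common0 := PySem.Dict.ofList d0            -- argmaps[0].copy()
    let common1 := rest.foldl (fun c args => pvAInner (PySem.Dict.ofList args) c) common0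
    let common := common1.insert "-fanout" (1 : Int)
    argmaps.map (fun args =>
      ((PySem.Dict.ofList args).items.foldl
        (fun ua p => if !(common.contains p.1) then ua.insert p.1 p.2 else ua)
        (PySem.Dict.empty : PySem.Dict String Int)).items)

-- ===== PORT B =====
-- one tally step: stats[k] = (rep, cnt+1, ok and rep == v)  /  first sight: (v, 1, True)
def pvStatStep (st : PySem.Dict String (Int × Int × Bool)) (p : String × Int) :
    PySem.Dict String (Int × Int × Bool) :=
  match st.get? p.1 with
  | some (rep, cnt, ok) => st.insert p.1 (rep, cnt + 1, ok && (rep == p.2))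
  | none => st.insert p.1 (p.2, 1, true)

def remove_common_args_alt (argmaps : List (List (String × Int))) : List (List (String × Int)) :=
  let n : Int := argmaps.length
  let stats := argmaps.foldl
      (fun st args => (PySem.Dict.ofList args).items.foldl pvStatStep st)
      (PySem.Dict.empty : PySem.Dict String (Int × Int × Bool))
  -- set comprehension {k for k, (rep, cnt, ok) in stats.items() if cnt == n and ok}
  let common0 : PySem.Set String :=
    PySem.Set.ofList ((stats.items.filter (fun q => (q.2.2.1 == n) && q.2.2.2)).map (·.1))
  let common := PySem.Set.add common0 "-fanout"
  -- dict comprehension over a dict's items (distinct keys) restricted by a key test = filter; exact here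
  argmaps.map (fun args =>
    (PySem.Dict.ofList args).items.filter (fun p => !(PySem.Set.contains common p.1)))

-- ===== PRECONDITION & SPEC =====
-- Pre_ excludes only the empty list, on which Python A raises IndexError (argmaps[0]).
def Pre_remove_common_args (argmaps : List (List (String × Int))) : Prop := argmaps ≠ []
instance (argmaps : List (List (String × Int))) : Decidable (Pre_remove_common_args argmaps) := by
  unfold Pre_remove_common_args; infer_instance

def pvWitness_remove_common_args : (List (List (String × Int))) :=
  [[("-topK", 10), ("-dim", 64)], [("-topK", 20), ("-dim", 64)]]

-- On empty argmaps A raises IndexError (argmaps[0]); B naturally returns [].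
def Raises_remove_common_args (argmaps : List (List (String × Int))) : Prop := argmaps = []
instance (argmaps : List (List (String × Int))) : Decidable (Raises_remove_common_args argmaps) := by
  unfold Raises_remove_common_args; infer_instance
def pvRaiseWitness_remove_common_args : (List (List (String × Int))) := []
def pvRaiseWitnessOut_remove_common_args : List (List (String × Int)) := []

def Spec_remove_common_args (argmaps : List (List (String × Int))) (out : List (List (String × Int))) : Prop := out = remove_common_args_alt argmaps
instance (argmaps : List (List (String × Int))) (out : List (List (String × Int))) : Decidable (Spec_remove_common_args argmaps out) := by unfold Spec_remove_common_args; infer_instance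

-- ===== CLAIM (what is proved, stated in full; the proofs are below) =====
def Claim_equal_remove_common_args : Prop := ∀ (argmaps : List (List (String × Int))), Dom_remove_common_args argmaps → Pre_remove_common_args argmaps → Spec_remove_common_args argmaps (remove_common_args argmaps)

def Claim_raises_remove_common_args : Prop := (∀ (argmaps : List (List (String × Int))), Dom_remove_common_args argmaps → Raises_remove_common_args argmaps → ¬ Pre_remove_common_args argmaps) ∧ (Dom_remove_common_args (pvRaiseWitness_remove_common_args) ∧ Raises_remove_common_args (pvRaiseWitness_remove_common_args) ∧ remove_common_args_alt (pvRaiseWitness_remove_common_args) = pvRaiseWitnessOut_remove_common_args)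

-- ===== LEMMAS AND PROOFS =====

theorem pv_get?_erase {ν : Type} (d : PySem.Dict String ν) (k k' : String) :
    (d.erase k).get? k' = if k' = k then none else d.get? k' := by
  obtain ⟨items⟩ := d
  simp only [PySem.Dict.erase, PySem.Dict.get?, List.find?_filter]
  by_cases h : k' = k
  · subst h
    simp
  · rw [if_neg h]
    have : (fun a : String × ν => decide ((!a.1 == k) = true ∧ (a.1 == k') = true))
        = (fun p : String × ν => p.1 == k') := by
      funext a
      by_cases ha : a.1 = k'
      · simp [ha, h]
      · simp [ha]
    rw [this]

theorem pv_nodup_keys_erase {ν : Type} (d : PySem.Dict String ν) (k : String)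
    (h : d.keys.Nodup) : (d.erase k).keys.Nodup := by
  have hs : ((d.erase k).items.map (·.1)).Sublist (d.items.map (·.1)) :=
    List.Sublist.map _ List.filter_sublist
  exact h.sublist hs

def pvGood (ad c : PySem.Dict String Int) (k : String) : Bool :=
  ad.contains k && (ad.getD k 0 == c.getD k 0)

theorem pv_inner_get? (ad : PySem.Dict String Int) :
    ∀ (ks : List String) (c : PySem.Dict String Int) (k : String), ks.Nodup →
    (ks.foldl (fun c k =>
        if !(ad.contains k) || (ad.getD k 0 != c.getD k 0) then c.erase k else c) c).get? k
    = if k ∈ ks ∧ pvGood ad c k = false then none else c.get? k := by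
  intro ks
  induction ks with
  | nil => intro c k _; simp
  | cons k0 ks' ih =>
    intro c k hnd
    have hk0 : k0 ∉ ks' := (List.nodup_cons.mp hnd).1
    have hnd' : ks'.Nodup := (List.nodup_cons.mp hnd).2
    rw [List.foldl_cons]
    set c1 := if !(ad.contains k0) || (ad.getD k0 0 != c.getD k0 0) then c.erase k0 else c with hc1
    by_cases hkk : k = k0
    · subst hkk
      rw [ih c1 k hnd']
      rw [if_neg (by simp [hk0])]
      by_cases hg : pvGood ad c k = true
      · have h1 : ad.contains k = true := by
          simp [pvGood] at hg; exact hg.1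
        have h2 : ad.getD k 0 = c.getD k 0 := by
          simp [pvGood] at hg; exact hg.2
        have : c1 = c := by rw [hc1, if_neg (by simp [h1, h2])]
        rw [this, if_neg (by simp [hg])]
      · have hb : (!(ad.contains k) || (ad.getD k 0 != c.getD k 0)) = true := by
          simp [pvGood] at hg ⊢
          by_cases hcon : ad.contains k = true
          · exact Or.inr (hg hcon)
          · exact Or.inl (by simpa using hcon)
        have : c1 = c.erase k := by rw [hc1, if_pos hb]
        rw [this, pv_get?_erase, if_pos rfl, if_pos]
        exact ⟨List.mem_cons_self, by simpa using hg⟩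
    · have hget : ∀ j, j ≠ k0 → c1.get? j = c.get? j := by
        intro j hj
        rw [hc1]
        split
        · rw [pv_get?_erase, if_neg hj]
        · rfl
      have hgood : pvGood ad c1 k = pvGood ad c k := by
        simp [pvGood, PySem.Dict.getD_eq_get?_getD, hget k hkk]
      rw [ih c1 k hnd', hgood, hget k hkk]
      have : (k ∈ ks') ↔ (k ∈ k0 :: ks') := by simp [hkk]
      by_cases hm : k ∈ ks' <;> by_cases hg : pvGood ad c k = false <;>
        simp [hm, hg, hkk]

theorem pv_fold_nodup (ad : PySem.Dict String Int) :
    ∀ (ks : List String) (c : PySem.Dict String Int), c.keys.Nodup →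
    ((ks.foldl (fun c k =>
        if !(ad.contains k) || (ad.getD k 0 != c.getD k 0) then c.erase k else c) c)).keys.Nodup := by
  intro ks
  induction ks with
  | nil => intro c h; simpa using h
  | cons k0 ks' ih =>
    intro c h
    rw [List.foldl_cons]
    apply ih
    split
    · exact pv_nodup_keys_erase c k0 h
    · exact h

theorem pv_inner_nodup (ad : PySem.Dict String Int) (c : PySem.Dict String Int)
    (h : c.keys.Nodup) : (pvAInner ad c).keys.Nodup :=
  pv_fold_nodup ad c.keys c h

theorem pv_outer_get? :
    ∀ (rest : List (List (String × Int))) (c : PySem.Dict String Int) (k : String), c.keys.Nodup →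
    (rest.foldl (fun c args => pvAInner (PySem.Dict.ofList args) c) c).get? k
    = if ∀ a ∈ rest, pvGood (PySem.Dict.ofList a) c k = true then c.get? k else none := by
  intro rest
  induction rest with
  | nil => intro c k _; simp
  | cons a0 rest' ih =>
    intro c k hnd
    rw [List.foldl_cons]
    set ad := PySem.Dict.ofList a0 with had
    set c1 := pvAInner ad c with hc1
    have hnd1 : c1.keys.Nodup := pv_inner_nodup ad c hnd
    have hkeys : ∀ j : String, j ∉ c.keys → c.get? j = none := by
      intro j hj
      exact (PySem.Dict.get?_eq_none_iff_not_mem_keys c j).mpr hj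
    have hc1get : c1.get? k = if pvGood ad c k = true then c.get? k else none := by
      rw [hc1, pvAInner, pv_inner_get? ad c.keys c k hnd]
      by_cases hg : pvGood ad c k = true
      · simp [hg]
      · by_cases hm : k ∈ c.keys
        · simp [hg, hm]
        · simp [hg, hm, hkeys k hm]
    rw [ih c1 k hnd1]
    by_cases hg : pvGood ad c k = true
    · have hge : c1.get? k = c.get? k := by rw [hc1get, if_pos hg]
      have hgood : ∀ a, pvGood (PySem.Dict.ofList a) c1 k = pvGood (PySem.Dict.ofList a) c k := by
        intro a
        simp [pvGood, PySem.Dict.getD_eq_get?_getD, hge]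
      by_cases hall : ∀ a ∈ rest', pvGood (PySem.Dict.ofList a) c k = true
      · rw [if_pos (by intro a ha; rw [hgood a]; exact hall a ha), hge,
            if_pos (by intro a ha; rcases List.mem_cons.mp ha with h | h; exacts [h ▸ hg, hall a h])]
      · rw [if_neg (by intro hcon; exact hall (fun a ha => by rw [← hgood a]; exact hcon a ha)),
            if_neg (by intro hcon; exact hall (fun a ha => hcon a (List.mem_cons_of_mem _ ha)))]
    · have hge : c1.get? k = none := by rw [hc1get, if_neg hg]
      have hrhs : ¬ ∀ a ∈ a0 :: rest', pvGood (PySem.Dict.ofList a) c k = true := by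
        intro hcon; exact hg (hcon a0 List.mem_cons_self)
      rw [if_neg hrhs]
      split
      · exact hge
      · rfl

def pvComb1 (o : Option (Int × Int × Bool)) (v : Int) : Int × Int × Bool :=
  match o with
  | some (r, c, ok) => (r, c + 1, ok && (r == v))
  | none => (v, 1, true)

theorem pv_statstep_get? (st : PySem.Dict String (Int × Int × Bool)) (p : String × Int) (k : String) :
    (pvStatStep st p).get? k = if k = p.1 then some (pvComb1 (st.get? p.1) p.2) else st.get? k := by
  rw [pvStatStep]
  rcases h : st.get? p.1 with _ | ⟨r, c, ok⟩
  · simp [PySem.Dict.get?_insert, pvComb1]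
  · simp [PySem.Dict.get?_insert, pvComb1]

theorem pv_stats_untouched :
    ∀ (ps : List (String × Int)) (st : PySem.Dict String (Int × Int × Bool)) (k : String),
    k ∉ ps.map (·.1) → (ps.foldl pvStatStep st).get? k = st.get? k := by
  intro ps
  induction ps with
  | nil => intro st k _; rfl
  | cons p tl ih =>
    intro st k hk
    have h1 : k ≠ p.1 := by simp at hk; exact hk.1
    have h2 : k ∉ tl.map (·.1) := by
      intro hmem
      obtain ⟨q, hq, hq1⟩ := List.mem_map.mp hmem
      simp at hk
      exact hk.2 q.2 (by rwa [show (k, q.2) = q from Prod.ext hq1.symm rfl])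
    rw [List.foldl_cons, ih _ k h2, pv_statstep_get?, if_neg h1]

theorem pv_stats_hit :
    ∀ (ps : List (String × Int)) (st : PySem.Dict String (Int × Int × Bool)) (k : String) (v : Int),
    (ps.map (·.1)).Nodup → (k, v) ∈ ps →
    (ps.foldl pvStatStep st).get? k = some (pvComb1 (st.get? k) v) := by
  intro ps
  induction ps with
  | nil => intro st k v _ h; simp at h
  | cons p tl ih =>
    intro st k v hnd hm
    have hnd' : (tl.map (·.1)).Nodup := (List.nodup_cons.mp hnd).2
    rw [List.foldl_cons]
    rcases List.mem_cons.mp hm with h | h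
    · have hk : k = p.1 := by rw [← h]
      have hkn : k ∉ tl.map (·.1) := by rw [hk]; exact (List.nodup_cons.mp hnd).1
      rw [pv_stats_untouched tl _ k hkn, pv_statstep_get?, if_pos hk, hk, ← h]
    · have hk : k ≠ p.1 := by
        intro he
        exact (List.nodup_cons.mp hnd).1 (List.mem_map.mpr ⟨(k, v), h, he⟩)
      rw [ih _ k v hnd' h, pv_statstep_get?, if_neg hk]

theorem pv_stats_dict (d : PySem.Dict String Int) (hnd : d.keys.Nodup)
    (st : PySem.Dict String (Int × Int × Bool)) (k : String) :
    (d.items.foldl pvStatStep st).get? k =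
      match d.get? k with
      | none => st.get? k
      | some v => some (pvComb1 (st.get? k) v) := by
  rcases h : d.get? k with _ | v
  · have hk : k ∉ d.keys := (PySem.Dict.get?_eq_none_iff_not_mem_keys d k).mp h
    exact pv_stats_untouched d.items st k hk
  · have hm : (k, v) ∈ d.items := PySem.Dict.mem_items_of_get?_eq_some d h
    exact pv_stats_hit d.items st k v hnd hm

def pvVals (ams : List (List (String × Int))) (k : String) : List Int :=
  (ams.filter (fun a => (PySem.Dict.ofList a).contains k)).map
    (fun a => (PySem.Dict.ofList a).getD k 0)

theorem pv_stats_outer :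
    ∀ (ams : List (List (String × Int))) (st : PySem.Dict String (Int × Int × Bool)) (k : String),
    (ams.foldl (fun st args => (PySem.Dict.ofList args).items.foldl pvStatStep st) st).get? k
    = (pvVals ams k).foldl (fun o v => some (pvComb1 o v)) (st.get? k) := by
  intro ams
  induction ams with
  | nil => intro st k; simp [pvVals]
  | cons a tl ih =>
    intro st k
    rw [List.foldl_cons, ih _ k]
    have hnd := PySem.Dict.nodup_keys_ofList (ps := a) (κ := String) (ν := Int)
    rcases h : (PySem.Dict.ofList a).get? k with _ | v
    · have hcon : (PySem.Dict.ofList a).contains k = false := by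
        rw [PySem.Dict.contains_eq_isSome_get?, h]; rfl
      have : pvVals (a :: tl) k = pvVals tl k := by
        simp [pvVals, hcon]
      rw [this]
      congr 1
      rw [pv_stats_dict _ hnd st k, h]
    · have hcon : (PySem.Dict.ofList a).contains k = true := by
        rw [PySem.Dict.contains_eq_isSome_get?, h]; rfl
      have : pvVals (a :: tl) k = (PySem.Dict.ofList a).getD k 0 :: pvVals tl k := by
        simp [pvVals, hcon]
      rw [this, List.foldl_cons]
      congr 1
      rw [pv_stats_dict _ hnd st k, h, PySem.Dict.getD_eq_get?_getD, h]
      rfl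

theorem pv_comb_some (vs : List Int) :
    ∀ (r c : Int) (ok : Bool),
    vs.foldl (fun o v => some (pvComb1 o v)) (some (r, c, ok))
    = some (r, c + vs.length, ok && vs.all (fun v => r == v)) := by
  induction vs with
  | nil => intro r c ok; simp
  | cons v tl ih =>
    intro r c ok
    rw [List.foldl_cons]
    show tl.foldl _ (some (pvComb1 (some (r, c, ok)) v)) = _
    rw [show pvComb1 (some (r, c, ok)) v = (r, c + 1, ok && (r == v)) from rfl, ih]
    simp [Bool.and_assoc]
    omega

theorem pv_build (P : String × Int → Bool) :
    ∀ (ps : List (String × Int)) (d : PySem.Dict String Int),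
    (ps.map (·.1)).Nodup → d.keys.Nodup → (∀ p ∈ ps, d.contains p.1 = false) →
    (ps.foldl (fun ua p => if P p then ua.insert p.1 p.2 else ua) d).items
      = d.items ++ ps.filter P := by
  intro ps
  induction ps with
  | nil => intro d _ _ _; simp
  | cons p tl ih =>
    intro d hnd hd hdisj
    have hnd' : (tl.map (·.1)).Nodup := (List.nodup_cons.mp hnd).2
    have hp : d.contains p.1 = false := hdisj p List.mem_cons_self
    rw [List.foldl_cons]
    by_cases hP : P p = true
    · rw [if_pos hP]
      have hitems : (d.insert p.1 p.2).items = d.items ++ [(p.1, p.2)] :=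
        PySem.Dict.items_insert_of_not_contains d p.2 hp
      have hkeys : (d.insert p.1 p.2).keys = d.keys ++ [p.1] :=
        PySem.Dict.keys_insert_of_not_contains d p.2 hp
      have hnd2 : (d.insert p.1 p.2).keys.Nodup := by
        rw [hkeys]
        refine List.Nodup.append hd (List.nodup_singleton _) ?_
        intro x hx hx1
        simp at hx1
        subst hx1
        rw [PySem.Dict.contains_eq_decide_mem_keys] at hp
        simp at hp
        exact hp hx
      have hdisj2 : ∀ q ∈ tl, (d.insert p.1 p.2).contains q.1 = false := by
        intro q hq
        rw [PySem.Dict.contains_insert]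
        have hq1 : q.1 ≠ p.1 := by
          intro he
          exact (List.nodup_cons.mp hnd).1 (List.mem_map.mpr ⟨q, hq, he⟩)
        simp [hq1, hdisj q (List.mem_cons_of_mem _ hq)]
      rw [ih _ hnd' hnd2 hdisj2, hitems, List.filter_cons]
      simp [hP]
    · rw [if_neg hP, ih _ hnd' hd (fun q hq => hdisj q (List.mem_cons_of_mem _ hq)),
          List.filter_cons_of_neg (by simpa using hP)]

theorem pv_statstep_nodup (st : PySem.Dict String (Int × Int × Bool)) (p : String × Int)
    (h : st.keys.Nodup) : (pvStatStep st p).keys.Nodup := by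
  rw [pvStatStep]
  rcases st.get? p.1 with _ | ⟨r, c, ok⟩
  · exact PySem.Dict.nodup_keys_insert _ _ _ h
  · exact PySem.Dict.nodup_keys_insert _ _ _ h

theorem pv_stats_nodup :
    ∀ (ps : List (String × Int)) (st : PySem.Dict String (Int × Int × Bool)),
    st.keys.Nodup → (ps.foldl pvStatStep st).keys.Nodup := by
  intro ps
  induction ps with
  | nil => intro st h; simpa using h
  | cons p tl ih => intro st h; exact ih _ (pv_statstep_nodup st p h)

theorem pv_stats_outer_nodup :
    ∀ (ams : List (List (String × Int))) (st : PySem.Dict String (Int × Int × Bool)),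
    st.keys.Nodup →
    ((ams.foldl (fun st args => (PySem.Dict.ofList args).items.foldl pvStatStep st) st)).keys.Nodup := by
  intro ams
  induction ams with
  | nil => intro st h; simpa using h
  | cons a tl ih => intro st h; exact ih _ (pv_stats_nodup _ st h)

theorem pv_comb_none (v : Int) (tl : List Int) :
    (v :: tl).foldl (fun o v => some (pvComb1 o v)) none
    = some (v, 1 + (tl.length : Int), tl.all (fun w => v == w)) := by
  rw [List.foldl_cons]
  show tl.foldl _ (some (v, 1, true)) = _
  rw [pv_comb_some]
  simp

theorem pv_filter_mem (d0 : List (String × Int)) (rest : List (List (String × Int))) (k : String) :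
    (k ∈ ((((d0 :: rest).foldl
        (fun st args => (PySem.Dict.ofList args).items.foldl pvStatStep st)
        (PySem.Dict.empty : PySem.Dict String (Int × Int × Bool))).items.filter
          (fun q => (q.2.2.1 == ((d0 :: rest).length : Int)) && q.2.2.2)).map (·.1)))
    ↔ ((PySem.Dict.ofList d0).contains k = true ∧
        ∀ a ∈ rest, pvGood (PySem.Dict.ofList a) (PySem.Dict.ofList d0) k = true) := by
  set ams := d0 :: rest with hams
  set stats := ams.foldl (fun st args => (PySem.Dict.ofList args).items.foldl pvStatStep st)
      (PySem.Dict.empty : PySem.Dict String (Int × Int × Bool)) with hstats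
  have hnd : stats.keys.Nodup := pv_stats_outer_nodup ams _ (by simp [PySem.Dict.empty, PySem.Dict.keys])
  have hget : stats.get? k = (pvVals ams k).foldl (fun o v => some (pvComb1 o v)) none := by
    rw [hstats, pv_stats_outer ams _ k, PySem.Dict.get?_empty]
  constructor
  · rintro hmem
    obtain ⟨q, hq, hq1⟩ := List.mem_map.mp hmem
    obtain ⟨hqi, hqc⟩ := List.mem_filter.mp hq
    have hq' : (k, q.2) ∈ stats.items := by
      rwa [show (k, q.2) = q from Prod.ext hq1.symm rfl]
    have hsome : stats.get? k = some q.2 := PySem.Dict.get?_of_mem_items stats hq' hnd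
    rcases hvs : pvVals ams k with _ | ⟨v, tl⟩
    · rw [hget, hvs] at hsome; simp at hsome
    · rw [hget, hvs, pv_comb_none] at hsome
      have hq2 : q.2 = (v, 1 + (tl.length : Int), tl.all (fun w => v == w)) := by
        injection hsome.symm
      rw [hq2] at hqc
      simp only [Bool.and_eq_true, beq_iff_eq] at hqc
      have h1 := hqc.1
      have hlen : (ams.filter (fun a => (PySem.Dict.ofList a).contains k)).length = ams.length := by
        have h2 : (pvVals ams k).length = tl.length + 1 := by rw [hvs]; simp
        rw [pvVals, List.length_map] at h2
        omega
      have hall : ∀ a ∈ ams, (PySem.Dict.ofList a).contains k = true :=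
        List.length_filter_eq_length_iff.mp hlen
      have hfilter : ams.filter (fun a => (PySem.Dict.ofList a).contains k) = ams :=
        List.filter_eq_self.mpr hall
      have hvs2 : pvVals ams k
          = (PySem.Dict.ofList d0).getD k 0
            :: rest.map (fun a => (PySem.Dict.ofList a).getD k 0) := by
        rw [pvVals, hfilter, hams]
        simp
      rw [hvs] at hvs2
      have hv : v = (PySem.Dict.ofList d0).getD k 0 := (List.cons_eq_cons.mp hvs2).1
      have htl : tl = rest.map (fun a => (PySem.Dict.ofList a).getD k 0) :=
        (List.cons_eq_cons.mp hvs2).2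
      refine ⟨hall d0 (by rw [hams]; exact List.mem_cons_self), ?_⟩
      intro a ha
      have hca := hall a (by rw [hams]; exact List.mem_cons_of_mem _ ha)
      have hallv := hqc.2
      rw [htl] at hallv
      simp only [List.all_map, List.all_eq_true] at hallv
      have hva := hallv a ha
      simp only [Function.comp, beq_iff_eq] at hva
      rw [pvGood, hca]
      simp only [Bool.true_and, beq_iff_eq]
      rw [← hva, ← hv]
  · rintro ⟨hc0, hrest⟩
    have hall : ∀ a ∈ ams, (PySem.Dict.ofList a).contains k = true := by
      intro a ha
      rw [hams] at ha
      rcases List.mem_cons.mp ha with h | h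
      · rw [h]; exact hc0
      · exact ((Bool.and_eq_true _ _).mp (hrest a h)).1
    have hfilter : ams.filter (fun a => (PySem.Dict.ofList a).contains k) = ams :=
      List.filter_eq_self.mpr hall
    have hvs2 : pvVals ams k
        = (PySem.Dict.ofList d0).getD k 0
          :: rest.map (fun a => (PySem.Dict.ofList a).getD k 0) := by
      rw [pvVals, hfilter, hams]
      simp
    have hsome : stats.get? k = some ((PySem.Dict.ofList d0).getD k 0,
        1 + ((rest.map (fun a => (PySem.Dict.ofList a).getD k 0)).length : Int),
        (rest.map (fun a => (PySem.Dict.ofList a).getD k 0)).all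
          (fun w => (PySem.Dict.ofList d0).getD k 0 == w)) := by
      rw [hget, hvs2, pv_comb_none]
    have hmem' := (PySem.Dict.get?_eq_some_iff_mem_items stats k _ hnd).mp hsome
    apply List.mem_map.mpr
    refine ⟨_, List.mem_filter.mpr ⟨hmem', ?_⟩, rfl⟩
    simp only [Bool.and_eq_true, beq_iff_eq]
    constructor
    · simp [hams]
      omega
    · simp only [List.all_map, List.all_eq_true]
      intro a ha
      have := hrest a ha
      rw [pvGood] at this
      have h2 := ((Bool.and_eq_true _ _).mp this).2
      simp only [Function.comp, beq_iff_eq] at h2 ⊢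
      exact h2.symm

theorem pv_common_eq (d0 : List (String × Int)) (rest : List (List (String × Int))) (k : String) :
    PySem.Set.contains (PySem.Set.add (PySem.Set.ofList
      ((((d0 :: rest).foldl
          (fun st args => (PySem.Dict.ofList args).items.foldl pvStatStep st)
          (PySem.Dict.empty : PySem.Dict String (Int × Int × Bool))).items.filter
            (fun q => (q.2.2.1 == ((d0 :: rest).length : Int)) && q.2.2.2)).map (·.1))) "-fanout") k
    = ((rest.foldl (fun c args => pvAInner (PySem.Dict.ofList args) c)
          (PySem.Dict.ofList d0)).insert "-fanout" (1 : Int)).contains k := by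
  have hndd0 : (PySem.Dict.ofList d0).keys.Nodup := PySem.Dict.nodup_keys_ofList d0
  have hA : (((rest.foldl (fun c args => pvAInner (PySem.Dict.ofList args) c)
        (PySem.Dict.ofList d0)).insert "-fanout" (1 : Int)).contains k = true)
      ↔ (k = "-fanout" ∨ ((PySem.Dict.ofList d0).contains k = true ∧
          ∀ a ∈ rest, pvGood (PySem.Dict.ofList a) (PySem.Dict.ofList d0) k = true)) := by
    rw [PySem.Dict.contains_insert]
    simp only [Bool.or_eq_true, beq_iff_eq]
    apply or_congr Iff.rfl
    rw [PySem.Dict.contains_eq_isSome_get?, pv_outer_get? rest _ k hndd0]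
    by_cases hg : ∀ a ∈ rest, pvGood (PySem.Dict.ofList a) (PySem.Dict.ofList d0) k = true
    · rw [if_pos hg, ← PySem.Dict.contains_eq_isSome_get?]
      exact ⟨fun h => ⟨h, hg⟩, fun h => h.1⟩
    · rw [if_neg hg]
      simp [hg]
  have hB : (PySem.Set.contains (PySem.Set.add (PySem.Set.ofList
        ((((d0 :: rest).foldl
            (fun st args => (PySem.Dict.ofList args).items.foldl pvStatStep st)
            (PySem.Dict.empty : PySem.Dict String (Int × Int × Bool))).items.filter
              (fun q => (q.2.2.1 == ((d0 :: rest).length : Int)) && q.2.2.2)).map (·.1))) "-fanout") k = true)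
      ↔ (((PySem.Dict.ofList d0).contains k = true ∧
          ∀ a ∈ rest, pvGood (PySem.Dict.ofList a) (PySem.Dict.ofList d0) k = true) ∨ k = "-fanout") := by
    rw [show (PySem.Set.contains = fun (s : PySem.Set String) x => List.contains s x) from rfl]
    simp only [List.contains_iff_mem]
    rw [PySem.Set.mem_add]
    exact or_congr ((PySem.Set.mem_ofList _ _).trans (pv_filter_mem d0 rest k)) Iff.rfl
  rw [Bool.eq_iff_iff, hA, hB]
  exact or_comm

-- ===== VERDICT (by name: the statement is the Claim_ definition above) =====
theorem remove_common_args_spec : Claim_equal_remove_common_args := by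
  intro argmaps hdom hpre
  unfold Spec_remove_common_args
  match argmaps with
  | [] => exact absurd rfl hpre
  | d0 :: rest =>
    simp only [remove_common_args, remove_common_args_alt]
    apply List.map_congr_left
    intro args _
    have hnd : ((PySem.Dict.ofList args).items.map (·.1)).Nodup :=
      PySem.Dict.nodup_keys_ofList args
    rw [pv_build _ _ _ hnd (by simp [PySem.Dict.empty, PySem.Dict.keys])
        (fun p _ => rfl)]
    rw [show (PySem.Dict.empty : PySem.Dict String Int).items = [] from rfl, List.nil_append]
    apply List.filter_congr
    intro p _
    rw [pv_common_eq d0 rest p.1]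

@[simp] theorem remove_common_args_raises : Claim_raises_remove_common_args := by
  unfold Claim_raises_remove_common_args
  refine ⟨fun argmaps _ h => ?_, by decide⟩
  simp only [Raises_remove_common_args] at h
  simp [Pre_remove_common_args, h]
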